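-- pv_equiv track=rewrite | github.com/libknu/static-profiler | analysis/callgraph_pipeline.py | reverse_reachable_to_sinks
-- ===== SOURCE A (Python) =====
-- from collections import defaultdict
-- from typing import Dict, Iterable, List, Set, Tuple
--
-- def reverse_reachable_to_sinks(edges: Set[Tuple[str, str]], sinks: Set[str]) -> Set[str]:
--     rev: Dict[str, Set[str]] = defaultdict(set)
--     for caller, callee in edges:
--         rev[callee].add(caller)
--
--     seen: Set[str] = set(sinks)
--     stack = list(sinks)
--     while stack:
--         cur = stack.pop()
--         for prev in rev.get(cur, ()):
--             if prev not in seen: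
--                 seen.add(prev)
--                 stack.append(prev)
--     return seen
-- ===== SOURCE B (Python) =====
-- def reverse_reachable_to_sinks(edges, sinks):
--     seen = set(sinks)
--     changed = True
--     while changed:
--         changed = False
--         for caller, callee in edges:
--             if callee in seen and caller not in seen:
--                 seen.add(caller)
--                 changed = True
--     return seen
-- ===== Notes on version B (the rewrite author's own statement) =====
-- stated objective: simpler
-- what changed: Replaces the reverse-adjacency-dict build plus explicit-stack DFS by a fixpoint loop that rescans the raw edge set, adding a caller whenever its callee is already reached, until a full pass adds nothing.
import Mathlib
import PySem

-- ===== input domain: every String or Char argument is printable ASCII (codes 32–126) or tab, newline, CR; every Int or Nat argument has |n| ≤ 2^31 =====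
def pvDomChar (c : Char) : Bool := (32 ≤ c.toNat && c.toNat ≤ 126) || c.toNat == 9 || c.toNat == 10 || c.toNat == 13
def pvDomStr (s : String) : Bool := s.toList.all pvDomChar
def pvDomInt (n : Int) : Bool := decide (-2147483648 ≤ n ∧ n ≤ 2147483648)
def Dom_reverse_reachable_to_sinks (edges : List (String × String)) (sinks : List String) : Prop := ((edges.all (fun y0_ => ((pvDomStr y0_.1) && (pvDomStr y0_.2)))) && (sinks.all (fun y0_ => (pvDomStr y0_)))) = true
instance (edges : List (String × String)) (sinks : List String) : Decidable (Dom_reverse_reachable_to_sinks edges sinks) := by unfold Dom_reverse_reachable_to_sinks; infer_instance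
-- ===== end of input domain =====

-- B replaces A's reverse-adjacency-dict build + explicit-stack DFS by a fixpoint loop that rescans
-- the raw edge set until a full pass adds nothing (objective: simpler; not faster).
-- Both Pythons return a SET; PySem does not model set iteration order, so both ports render the
-- returned set in sorted order — exact under the set comparison used for set-valued returns.

-- ===== PORT A =====
-- 'rev = defaultdict(set); for caller, callee in edges: rev[callee].add(caller)'
def pvRevBuild (edges : List (String × String)) : PySem.Dict String (PySem.Set String) :=
  edges.foldl (fun d e => d.insert e.2 (PySem.Set.add (d.getD e.2 PySem.Set.empty) e.1)) PySem.Dict.empty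

-- 'for prev in rev.get(cur, ()): if prev not in seen: seen.add(prev); stack.append(prev)'
def pvVisit (preds : List String) (acc : PySem.Set String × List String) : PySem.Set String × List String :=
  preds.foldl (fun acc prev => if acc.1.contains prev then acc else (PySem.Set.add acc.1 prev, acc.2 ++ [prev])) acc

-- rev.get(cur, ()) — dict lookup with empty default
def pvRev_get (rev : PySem.Dict String (PySem.Set String)) (cur : String) : PySem.Set String :=
  rev.getD cur PySem.Set.empty

-- 'while stack: cur = stack.pop(); …' — fuel counts while-iterations; sinks.length + edges.length + 1
-- is proved sufficient below (pvDfs_spec), so the loop always terminates via the stack-empty branch.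
def pvDfs (rev : PySem.Dict String (PySem.Set String)) : Nat → PySem.Set String × List String → PySem.Set String
  | 0, (seen, _) => seen
  | fuel+1, (seen, stack) =>
    match PySem.List.pop? stack with
    | none => seen
    | some (cur, rest) => pvDfs rev fuel (pvVisit ((pvRev_get rev cur)) (seen, rest))

def reverse_reachable_to_sinks (edges : List (String × String)) (sinks : List String) : List String :=
  PySem.List.sorted
    (pvDfs (pvRevBuild edges) (sinks.length + edges.length + 1) (PySem.Set.ofList sinks, sinks))
    (fun x => x)

-- ===== PORT B =====
-- one 'for caller, callee in edges' pass; the Bool is the 'changed' flag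
def pvPass (edges : List (String × String)) (acc : PySem.Set String × Bool) : PySem.Set String × Bool :=
  edges.foldl (fun acc e =>
    if acc.1.contains e.2 && !acc.1.contains e.1 then (PySem.Set.add acc.1 e.1, true) else acc) acc

-- 'while changed' — fuel counts passes; edges.length + 1 is proved sufficient below (pvFix_spec)
def pvFix (edges : List (String × String)) : Nat → PySem.Set String → PySem.Set String
  | 0, seen => seen
  | fuel+1, seen =>
    match pvPass edges (seen, false) with
    | (seen', true) => pvFix edges fuel seen'
    | (seen', false) => seen'

def reverse_reachable_to_sinks_alt (edges : List (String × String)) (sinks : List String) : List String :=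
  PySem.List.sorted (pvFix edges (edges.length + 1) (PySem.Set.ofList sinks)) (fun x => x)

-- ===== PRECONDITION & SPEC =====
def Spec_reverse_reachable_to_sinks (edges : List (String × String)) (sinks : List String) (out : List String) : Prop := out = reverse_reachable_to_sinks_alt edges sinks
instance (edges : List (String × String)) (sinks : List String) (out : List String) : Decidable (Spec_reverse_reachable_to_sinks edges sinks out) := by unfold Spec_reverse_reachable_to_sinks; infer_instance

-- ===== CLAIM (what is proved, stated in full; the proofs are below) =====
def Claim_equal_reverse_reachable_to_sinks : Prop := ∀ (edges : List (String × String)) (sinks : List String), Dom_reverse_reachable_to_sinks edges sinks → Spec_reverse_reachable_to_sinks edges sinks (reverse_reachable_to_sinks edges sinks)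

-- ===== LEMMAS AND PROOFS =====

-- x is reverse-reachable to some sink
def pvStep (edges : List (String × String)) (a b : String) : Prop := (a, b) ∈ edges
def pvReach (edges : List (String × String)) (sinks : List String) (x : String) : Prop :=
  ∃ t ∈ sinks, Relation.ReflTransGen (pvStep edges) x t
-- universe of all nodes the algorithms can ever add
def pvU (edges : List (String × String)) (sinks : List String) : PySem.Set String :=
  PySem.Set.update (PySem.Set.ofList sinks) (edges.map Prod.fst)

lemma pvNodupLen {l1 l2 : List String} (h : l1.Nodup) (hs : ∀ x ∈ l1, x ∈ l2) :
    l1.length ≤ l2.length := by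
  calc l1.length = l1.toFinset.card := (List.toFinset_card_of_nodup h).symm
    _ ≤ l2.toFinset.card := Finset.card_le_card (fun a ha => by
        simp only [List.mem_toFinset] at *; exact hs a ha)
    _ ≤ l2.length := l2.toFinset_card_le

lemma pvLenAdd (s : PySem.Set String) (x : String) (hx : x ∉ s) :
    (PySem.Set.add s x).length = s.length + 1 := by
  simp [PySem.Set.add, PySem.Set.contains]
  rw [if_neg hx]; simp

lemma pvLenUpdate (l : List String) : ∀ s : PySem.Set String,
    (PySem.Set.update s l).length ≤ s.length + l.length := by
  induction l with
  | nil => intro s; simp [PySem.Set.update]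
  | cons x l ih =>
    intro s
    have h1 : (PySem.Set.add s x).length ≤ s.length + 1 := by
      simp [PySem.Set.add]; split <;> simp
    have := ih (PySem.Set.add s x)
    simp only [PySem.Set.update, List.foldl_cons, List.length_cons] at *
    omega

lemma pvPop_append (st : List String) (c : String) :
    PySem.List.pop? (st ++ [c]) = some (c, st) := by
  simp [PySem.List.pop?, PySem.List.pyIdx?]
  rw [List.eraseIdx_append_of_length_le (le_refl _)]
  simp

lemma pvRev_mem_aux (l : List (String × String)) : ∀ (d : PySem.Dict String (PySem.Set String)) (p c : String),
    p ∈ (l.foldl (fun d e => d.insert e.2 (PySem.Set.add (d.getD e.2 PySem.Set.empty) e.1)) d).getD c PySem.Set.empty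
    ↔ p ∈ d.getD c PySem.Set.empty ∨ (p, c) ∈ l := by
  induction l with
  | nil => simp
  | cons e l ih =>
    intro d p c
    rw [List.foldl_cons, ih]
    rw [PySem.Dict.getD_insert]
    by_cases hc : c = e.2
    · subst hc
      simp only [List.mem_cons, Prod.ext_iff, and_true, if_pos trivial]
      rw [PySem.Set.mem_add]
      tauto
    · simp only [if_neg hc, List.mem_cons, Prod.ext_iff]
      tauto

lemma pvRev_mem (edges : List (String × String)) (p c : String) :
    p ∈ pvRev_get (pvRevBuild edges) c ↔ (p, c) ∈ edges := by
  rw [pvRev_get, pvRevBuild, pvRev_mem_aux]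
  simp [PySem.Dict.getD, PySem.Dict.empty, PySem.Dict.get?, PySem.Set.empty]

lemma pvVisit_spec (l : List String) : ∀ (s : PySem.Set String) (st : List String), s.Nodup →
    (pvVisit l (s, st)).1.Nodup
    ∧ (∀ x, x ∈ (pvVisit l (s, st)).1 ↔ x ∈ s ∨ x ∈ l)
    ∧ (∀ x ∈ (pvVisit l (s, st)).2, x ∈ st ∨ x ∈ (pvVisit l (s, st)).1)
    ∧ (pvVisit l (s, st)).2.length + s.length = st.length + (pvVisit l (s, st)).1.length
    ∧ (∀ x ∈ st, x ∈ (pvVisit l (s, st)).2)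
    ∧ (∀ x ∈ l, x ∈ s ∨ x ∈ (pvVisit l (s, st)).2) := by
  induction l with
  | nil =>
    intro s st hnd
    refine ⟨hnd, by simp [pvVisit], fun x hx => Or.inl hx, by simp [pvVisit], fun x hx => hx, by simp⟩
  | cons p l ih =>
    intro s st hnd
    by_cases hp : p ∈ s
    · have hc : PySem.Set.contains s p = true := by
        simp [PySem.Set.contains]; exact hp
      have hunf : pvVisit (p :: l) (s, st) = pvVisit l (s, st) := by
        simp only [pvVisit, List.foldl_cons]
        rw [if_pos (by simpa [PySem.Set.contains] using hp)]
      obtain ⟨i1, i2, i3, i4, i5, i6⟩ := ih s st hnd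
      rw [hunf]
      refine ⟨i1, ?_, i3, i4, i5, ?_⟩
      · intro x
        rw [i2]
        simp only [List.mem_cons]
        constructor
        · tauto
        · rintro (h | rfl | h)
          · exact Or.inl h
          · exact Or.inl hp
          · exact Or.inr h
      · intro x hx
        rcases List.mem_cons.mp hx with h | h
        · exact Or.inl (h ▸ hp)
        · exact i6 x h
    · have hc : PySem.Set.contains s p = false := by
        simp [PySem.Set.contains]; exact hp
      have hunf : pvVisit (p :: l) (s, st) = pvVisit l (PySem.Set.add s p, st ++ [p]) := by
        simp only [pvVisit, List.foldl_cons]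
        rw [if_neg (by simpa [PySem.Set.contains] using hp)]
      have hnd' : (PySem.Set.add s p).Nodup := PySem.Set.nodup_add s p hnd
      obtain ⟨i1, i2, i3, i4, i5, i6⟩ := ih (PySem.Set.add s p) (st ++ [p]) hnd'
      have hlenadd : (PySem.Set.add s p).length = s.length + 1 := by
        simp only [PySem.Set.add]
        rw [if_neg (by simpa [PySem.Set.contains] using hp)]
        simp
      rw [hunf]
      have hpmem : p ∈ (pvVisit l (PySem.Set.add s p, st ++ [p])).2 := i5 p (by simp)
      refine ⟨i1, ?_, ?_, ?_, ?_, ?_⟩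
      · intro x; rw [i2, PySem.Set.mem_add]; simp only [List.mem_cons]; tauto
      · intro x hx
        rcases i3 x hx with h | h
        · rcases List.mem_append.mp h with h' | h'
          · exact Or.inl h'
          · refine Or.inr ?_
            rw [i2, PySem.Set.mem_add]
            simp at h'
            exact Or.inl (Or.inr h')
        · exact Or.inr h
      · simp only [List.length_append, List.length_cons, List.length_nil] at i4 ⊢
        omega
      · intro x hx; exact i5 x (by simp [hx])
      · intro x hx
        rcases List.mem_cons.mp hx with h | h
        · subst h; exact Or.inr hpmem
        · rcases i6 x h with h' | h'
          · rw [PySem.Set.mem_add] at h'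
            rcases h' with h'' | h''
            · exact Or.inl h''
            · subst h''; exact Or.inr hpmem
          · exact Or.inr h'

lemma pvDfs_spec (edges : List (String × String)) (sinks : List String) :
    ∀ (fuel : Nat) (seen : PySem.Set String) (stack : List String),
    seen.Nodup →
    (∀ x ∈ seen, x ∈ pvU edges sinks) →
    (∀ x ∈ stack, x ∈ seen) →
    (∀ t ∈ sinks, t ∈ seen) →
    (∀ x ∈ seen, pvReach edges sinks x) →
    (∀ x ∈ seen, x ∈ stack ∨ ∀ p, (p, x) ∈ edges → p ∈ seen) →
    stack.length + (pvU edges sinks).length ≤ fuel + seen.length →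
    (pvDfs (pvRevBuild edges) fuel (seen, stack)).Nodup
    ∧ (∀ t ∈ sinks, t ∈ pvDfs (pvRevBuild edges) fuel (seen, stack))
    ∧ (∀ x ∈ pvDfs (pvRevBuild edges) fuel (seen, stack), pvReach edges sinks x)
    ∧ (∀ x ∈ pvDfs (pvRevBuild edges) fuel (seen, stack), ∀ p, (p, x) ∈ edges →
         p ∈ pvDfs (pvRevBuild edges) fuel (seen, stack)) := by
  intro fuel
  induction fuel with
  | zero =>
    intro seen stack h1 h2 h3 h4 h5 h6 h7
    have hlen : seen.length ≤ (pvU edges sinks).length := pvNodupLen h1 h2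
    have hst : stack = [] := by
      have hz : stack.length = 0 := by omega
      exact List.length_eq_zero_iff.mp hz
    subst hst
    refine ⟨h1, h4, h5, ?_⟩
    intro x hx p hp
    rcases h6 x hx with h | h
    · simp at h
    · exact h p hp
  | succ fuel ih =>
    intro seen stack h1 h2 h3 h4 h5 h6 h7
    by_cases hst : stack = []
    · subst hst
      have hunf : pvDfs (pvRevBuild edges) (fuel+1) (seen, []) = seen := by
        simp [pvDfs, PySem.List.pop?, PySem.List.pyIdx?]
      rw [hunf]
      refine ⟨h1, h4, h5, ?_⟩
      intro x hx p hp
      rcases h6 x hx with h | h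
      · simp at h
      · exact h p hp
    · have hsplit : stack.dropLast ++ [stack.getLast hst] = stack := List.dropLast_append_getLast hst
      set cur := stack.getLast hst with hcur
      set rest := stack.dropLast with hrest
      have hpop : PySem.List.pop? stack = some (cur, rest) := by
        rw [← hsplit]; exact pvPop_append rest cur
      set preds := pvRev_get (pvRevBuild edges) cur with hpreds
      have hunf : pvDfs (pvRevBuild edges) (fuel+1) (seen, stack)
          = pvDfs (pvRevBuild edges) fuel (pvVisit preds (seen, rest)) := by
        simp only [pvDfs, hpop]
        rw [hpreds]
      obtain ⟨v1, v2, v3, v4, v5, v6⟩ := pvVisit_spec preds seen rest h1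
      set s' := (pvVisit preds (seen, rest)).1 with hs'
      set st' := (pvVisit preds (seen, rest)).2 with hst'
      have hpair : pvVisit preds (seen, rest) = (s', st') := rfl
      have hcurmem : cur ∈ seen := h3 cur (List.getLast_mem hst)
      have hrest_sub : ∀ x ∈ rest, x ∈ stack := by
        intro x hx; rw [← hsplit]; exact List.mem_append_left _ hx
    -- the recursive call satisfies every invariant
      have c2 : ∀ x ∈ s', x ∈ pvU edges sinks := by
        intro x hx
        rcases (v2 x).mp hx with h | h
        · exact h2 x h
        · have : (x, cur) ∈ edges := (pvRev_mem edges x cur).mp h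
          exact (PySem.Set.mem_update _ _ x).mpr (Or.inr (List.mem_map.mpr ⟨(x, cur), this, rfl⟩))
      have c3 : ∀ x ∈ st', x ∈ s' := by
        intro x hx
        rcases v3 x hx with h | h
        · exact (v2 x).mpr (Or.inl (h3 x (hrest_sub x h)))
        · exact h
      have c4 : ∀ t ∈ sinks, t ∈ s' := fun t ht => (v2 t).mpr (Or.inl (h4 t ht))
      have c5 : ∀ x ∈ s', pvReach edges sinks x := by
        intro x hx
        rcases (v2 x).mp hx with h | h
        · exact h5 x h
        · have hedge : (x, cur) ∈ edges := (pvRev_mem edges x cur).mp h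
          obtain ⟨t, ht, hrtg⟩ := h5 cur hcurmem
          exact ⟨t, ht, Relation.ReflTransGen.head hedge hrtg⟩
      have c6 : ∀ x ∈ s', x ∈ st' ∨ ∀ p, (p, x) ∈ edges → p ∈ s' := by
        intro x hx
        by_cases hxs : x ∈ seen
        · rcases h6 x hxs with h | h
          · rw [← hsplit] at h
            rcases List.mem_append.mp h with h' | h'
            · exact Or.inl (v5 x h')
            · have hxc : x = cur := by simpa using h'
              exact Or.inr (fun p hp =>
                (v2 p).mpr (Or.inr ((pvRev_mem edges p cur).mpr (hxc ▸ hp))))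
          · exact Or.inr (fun p hp => (v2 p).mpr (Or.inl (h p hp)))
        · have hxl : x ∈ preds := ((v2 x).mp hx).resolve_left hxs
          rcases v6 x hxl with h | h
          · exact absurd h hxs
          · exact Or.inl h
      have c7 : st'.length + (pvU edges sinks).length ≤ fuel + s'.length := by
        have hlen : stack.length = rest.length + 1 := by
          rw [← hsplit]; simp
        omega
      have := ih s' st' v1 c2 c3 c4 c5 c6 c7
      rw [hunf, hpair]
      exact this

lemma pvPass_spec (E : List (String × String)) (sinks : List String) :
    ∀ (l : List (String × String)) (s : PySem.Set String) (b : Bool),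
    (∀ e ∈ l, e ∈ E) → s.Nodup → (∀ x ∈ s, pvReach E sinks x) →
    (pvPass l (s, b)).1.Nodup
    ∧ (∀ x ∈ s, x ∈ (pvPass l (s, b)).1)
    ∧ (∀ x ∈ (pvPass l (s, b)).1, x ∈ s ∨ x ∈ l.map Prod.fst)
    ∧ (∀ x ∈ (pvPass l (s, b)).1, pvReach E sinks x)
    ∧ (b = true → (pvPass l (s, b)).2 = true)
    ∧ ((pvPass l (s, b)).2 = false → (pvPass l (s, b)).1 = s ∧ ∀ e ∈ l, e.2 ∈ s → e.1 ∈ s)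
    ∧ (b = false → (pvPass l (s, b)).2 = true → s.length < (pvPass l (s, b)).1.length) := by
  intro l
  induction l with
  | nil =>
    intro s b _ hnd hre
    refine ⟨hnd, fun x hx => hx, fun x hx => Or.inl hx, hre, fun h => h, fun _ => ⟨rfl, by simp⟩, ?_⟩
    intro hb ht; rw [hb] at ht; exact absurd ht (by simp [pvPass])
  | cons e l ih =>
    intro s b hsub hnd hre
    by_cases hcond : e.2 ∈ s ∧ e.1 ∉ s
    · have hcb : (PySem.Set.contains s e.2 && !PySem.Set.contains s e.1) = true := by
        simp [PySem.Set.contains]; exact ⟨hcond.1, hcond.2⟩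
      have hunf : pvPass (e :: l) (s, b) = pvPass l (PySem.Set.add s e.1, true) := by
        simp only [pvPass, List.foldl_cons]
        rw [if_pos (by simpa [PySem.Set.contains] using hcond)]
      have he : e ∈ E := hsub e (List.mem_cons_self ..)
      have hre' : ∀ x ∈ PySem.Set.add s e.1, pvReach E sinks x := by
        intro x hx
        rcases (PySem.Set.mem_add s e.1 x).mp hx with h | h
        · exact hre x h
        · subst h
          obtain ⟨t, ht, hrtg⟩ := hre e.2 hcond.1
          exact ⟨t, ht, Relation.ReflTransGen.head he hrtg⟩
      obtain ⟨i1, i2, i3, i4, i5, i6, i7⟩ :=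
        ih (PySem.Set.add s e.1) true (fun e' he' => hsub e' (List.mem_cons_of_mem _ he'))
          (PySem.Set.nodup_add s e.1 hnd) hre'
      have hmono : ∀ x ∈ s, x ∈ (pvPass l (PySem.Set.add s e.1, true)).1 := by
        intro x hx
        exact i2 x ((PySem.Set.mem_add s e.1 x).mpr (Or.inl hx))
      rw [hunf]
      refine ⟨i1, hmono, ?_, i4, fun _ => i5 rfl, ?_, ?_⟩
      · intro x hx
        rcases i3 x hx with h | h
        · rcases (PySem.Set.mem_add s e.1 x).mp h with h' | h'
          · exact Or.inl h'
          · exact Or.inr (by simp [h'])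
        · exact Or.inr (by simp only [List.map_cons, List.mem_cons]; exact Or.inr h)
      · intro hfalse
        exact absurd (i5 rfl) (by rw [hfalse]; simp)
      · intro _ _
        have hlt : s.length < (PySem.Set.add s e.1).length := by
          rw [pvLenAdd s e.1 hcond.2]; omega
        have hle := pvNodupLen (PySem.Set.nodup_add s e.1 hnd) i2
        omega
    · have hunf : pvPass (e :: l) (s, b) = pvPass l (s, b) := by
        simp only [pvPass, List.foldl_cons]
        rw [if_neg (by simpa [PySem.Set.contains] using hcond)]
      obtain ⟨i1, i2, i3, i4, i5, i6, i7⟩ :=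
        ih s b (fun e' he' => hsub e' (List.mem_cons_of_mem _ he')) hnd hre
      rw [hunf]
      refine ⟨i1, i2, ?_, i4, i5, ?_, i7⟩
      · intro x hx
        rcases i3 x hx with h | h
        · exact Or.inl h
        · exact Or.inr (by simp only [List.map_cons, List.mem_cons]; exact Or.inr h)
      · intro hfalse
        obtain ⟨hq, hcl⟩ := i6 hfalse
        refine ⟨hq, ?_⟩
        intro e' he' h2
        rcases List.mem_cons.mp he' with h' | h'
        · subst h'
          by_contra h1
          exact hcond ⟨h2, h1⟩
        · exact hcl e' h' h2

lemma pvFix_spec (E : List (String × String)) (sinks : List String) :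
    ∀ (fuel : Nat) (s : PySem.Set String),
    s.Nodup → (∀ x ∈ s, x ∈ pvU E sinks) → (∀ t ∈ sinks, t ∈ s) →
    (∀ x ∈ s, pvReach E sinks x) →
    (pvU E sinks).length + 1 ≤ fuel + s.length →
    (pvFix E fuel s).Nodup
    ∧ (∀ t ∈ sinks, t ∈ pvFix E fuel s)
    ∧ (∀ x ∈ pvFix E fuel s, pvReach E sinks x)
    ∧ (∀ e ∈ E, e.2 ∈ pvFix E fuel s → e.1 ∈ pvFix E fuel s) := by
  intro fuel
  induction fuel with
  | zero =>
    intro s h1 h2 _ _ h7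
    have := pvNodupLen h1 h2
    omega
  | succ fuel ih =>
    intro s h1 h2 h3 h4 h7
    obtain ⟨p1, p2, p3, p4, _, p6, p7⟩ := pvPass_spec E sinks E s false (fun _ he => he) h1 h4
    rcases hp : pvPass E (s, false) with ⟨s', ch⟩
    rw [hp] at p1 p2 p3 p4 p6 p7
    cases ch with
    | false =>
      have hunf : pvFix E (fuel + 1) s = s' := by
        simp only [pvFix, hp]
      obtain ⟨hq, hcl⟩ := p6 rfl
      simp only at hq
      rw [hunf, hq]
      exact ⟨h1, h3, h4, fun e he h2' => hcl e he h2'⟩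
    | true =>
      have hunf : pvFix E (fuel + 1) s = pvFix E fuel s' := by
        simp only [pvFix, hp]
      have hlt : s.length < s'.length := p7 rfl rfl
      rw [hunf]
      refine ih s' p1 ?_ (fun t ht => p2 t (h3 t ht)) p4 (by omega)
      intro x hx
      rcases p3 x hx with h | h
      · exact h2 x h
      · exact (PySem.Set.mem_update _ _ x).mpr (Or.inr h)

lemma pvClosed_complete (E : List (String × String)) (sinks : List String) (r : List String)
    (hs : ∀ t ∈ sinks, t ∈ r) (hc : ∀ p x, (p, x) ∈ E → x ∈ r → p ∈ r) :
    ∀ x, pvReach E sinks x → x ∈ r := by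
  rintro x ⟨t, ht, hrtg⟩
  induction hrtg using Relation.ReflTransGen.head_induction_on with
  | refl => exact hs t ht
  | head h' _ ih => exact hc _ _ h' ih

lemma pvSortedCanon (xs ys : List String) (hx : xs.Nodup) (hy : ys.Nodup)
    (hmem : ∀ a, a ∈ xs ↔ a ∈ ys) :
    PySem.List.sorted xs (fun x => x) = PySem.List.sorted ys (fun x => x) := by
  apply PySem.List.sorted_eq_of_perm_of_pairwise_lt
  · exact (PySem.List.sorted_perm ys (fun x => x) false).trans
      ((List.perm_ext_iff_of_nodup hy hx).mpr (fun a => (hmem a).symm))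
  · have hnd : (PySem.List.sorted ys (fun x => x)).Nodup :=
      (PySem.List.sorted_perm ys (fun x => x) false).nodup_iff.mpr hy
    have hle : List.Pairwise (fun a b : String => a ≤ b) (PySem.List.sorted ys (fun x => x)) :=
      PySem.List.sorted_pairwise ys (fun x => x)
    have hne : List.Pairwise (fun a b : String => a ≠ b) (PySem.List.sorted ys (fun x => x)) :=
      hnd.pairwise_of_forall_ne (fun a _ b _ hne => hne)
    exact List.Pairwise.imp₂ (fun a b h1 h2 => lt_of_le_of_ne h1 h2) hle hne

-- ===== VERDICT (by name: the statement is the Claim_ definition above) =====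
theorem reverse_reachable_to_sinks_spec : Claim_equal_reverse_reachable_to_sinks := by
  intro edges sinks _
  unfold Spec_reverse_reachable_to_sinks reverse_reachable_to_sinks reverse_reachable_to_sinks_alt
  have hnd0 := PySem.Set.nodup_ofList sinks
  have hU0 : ∀ x ∈ PySem.Set.ofList sinks, x ∈ pvU edges sinks :=
    fun x hx => (PySem.Set.mem_update _ _ x).mpr (Or.inl hx)
  have hsk0 : ∀ t ∈ sinks, t ∈ PySem.Set.ofList sinks :=
    fun t ht => (PySem.Set.mem_ofList sinks t).mpr ht
  have hre0 : ∀ x ∈ PySem.Set.ofList sinks, pvReach edges sinks x :=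
    fun x hx => ⟨x, (PySem.Set.mem_ofList sinks x).mp hx, Relation.ReflTransGen.refl⟩
  have hUlen : (pvU edges sinks).length ≤ (PySem.Set.ofList sinks).length + edges.length := by
    have := pvLenUpdate (edges.map Prod.fst) (PySem.Set.ofList sinks)
    simpa using this
  obtain ⟨a1, a2, a3, a4⟩ := pvDfs_spec edges sinks (sinks.length + edges.length + 1)
    (PySem.Set.ofList sinks) sinks hnd0 hU0
    (fun x hx => (PySem.Set.mem_ofList sinks x).mpr hx) hsk0 hre0
    (fun x hx => Or.inl ((PySem.Set.mem_ofList sinks x).mp hx))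
    (by omega)
  obtain ⟨b1, b2, b3, b4⟩ := pvFix_spec edges sinks (edges.length + 1)
    (PySem.Set.ofList sinks) hnd0 hU0 hsk0 hre0 (by omega)
  apply pvSortedCanon _ _ a1 b1
  intro a
  constructor
  · intro ha
    exact pvClosed_complete edges sinks _ b2 (fun p x hpx hx => b4 (p, x) hpx hx) a (a3 a ha)
  · intro hb
    exact pvClosed_complete edges sinks _ a2 (fun p x hpx hx => a4 x hx p hpx) a (b3 a hb)
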